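-- pv_equiv track=rewrite | github.com/Marclova/Big_Data_RAG_Project | src/services/other_services/raw_data_operator.py | _delete_or_fix_anomalous_lines
-- ===== SOURCE A (Python) =====
-- LINE_BREAKERS = {'\n','\b','\r','\v','\x0b','\f','\x0c','\u2028','\u2029'}
--
-- STRONG_PUNCTUATIONS = {')','.','!','?'}
--
-- def _delete_or_fix_anomalous_lines(text: str) -> str:
--     """
--     Deletes or fixes lines that are detrimental to dataset quality.
--
--     Processing rules (applied in order):
--     - Lines with fewer than 3 words are removed (typically titles or page numbers)
--     - Lines ending with strong punctuation are kept as-is (complete sentences)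
--     - Lines NOT ending with strong punctuation are treated as "chopped" and concatenated
--       with the next line, assuming the next line contains the missing part that was split
--       by a line-breaker character
--
--     Parameters:
--         text (str): The text chunk to check and fix (without trailing whitespaces)
--     Returns:
--         str: The fixed text chunk
--     """
--
--     new_text: str = ""
--     append_line: str = ""
--     last_char: str = ''
--     for char in text:
--         append_line = append_line + char
--         if(char not in LINE_BREAKERS): #Keep iterating until a newline is found
--             last_char = char
--         else: #Begin a chain of controls to the end of the line (the sequence is important)
--             if(len(append_line.split(" ")) < 3): #Too short, is a title or a page enumeration (discard)
--                 pass
--             else: #The line is legit...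
--                 new_text = new_text + append_line
--                 if(last_char not in STRONG_PUNCTUATIONS): #... but chopped
--                     new_text = new_text[:-1] + " " #removing the line-breaker character
--
--             append_line = ""
--             last_char = ""
--     new_text = new_text + append_line #insert remaining append-line
--     return new_text
-- ===== SOURCE B (Python) =====
-- LINE_BREAKERS = {'\n','\b','\r','\v','\x0b','\f','\x0c','\u2028','\u2029'}
--
-- STRONG_PUNCTUATIONS = {')','.','!','?'}
--
--
-- def _split_keepends(text):
--     """Cut text into breaker-terminated segments plus the un-terminated remainder."""
--     segments = []
--     cur = ""
--     for ch in text: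
--         cur += ch
--         if ch in LINE_BREAKERS:
--             segments.append(cur)
--             cur = ""
--     return segments, cur
--
--
-- def _fix_segment(seg):
--     """Map one breaker-terminated segment to its contribution to the output."""
--     if len(seg.split(' ')) < 3:     # fewer than 3 words: drop it
--         return ""
--     if seg[-2] in STRONG_PUNCTUATIONS:   # complete sentence: keep breaker
--         return seg
--     return seg[:-1] + ' '           # chopped line: breaker becomes a space
--
--
-- def _delete_or_fix_anomalous_lines(text: str) -> str:
--     segments, remainder = _split_keepends(text)
--     return ''.join(_fix_segment(s) for s in segments) + remainder
-- ===== Notes on version B (the rewrite author's own statement) =====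
-- stated objective: simpler
-- what changed: Replaces A's single char-by-char accumulator pass (running output string, current line buffer and a last-char register, with output surgery new_text[:-1]) by a tokenize-then-map decomposition: split the text into breaker-terminated segments plus an un-terminated remainder, map each segment independently to its fixed form (drop / keep / breaker-to-space via seg[-2]), then join and append the remainder.
import Mathlib
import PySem

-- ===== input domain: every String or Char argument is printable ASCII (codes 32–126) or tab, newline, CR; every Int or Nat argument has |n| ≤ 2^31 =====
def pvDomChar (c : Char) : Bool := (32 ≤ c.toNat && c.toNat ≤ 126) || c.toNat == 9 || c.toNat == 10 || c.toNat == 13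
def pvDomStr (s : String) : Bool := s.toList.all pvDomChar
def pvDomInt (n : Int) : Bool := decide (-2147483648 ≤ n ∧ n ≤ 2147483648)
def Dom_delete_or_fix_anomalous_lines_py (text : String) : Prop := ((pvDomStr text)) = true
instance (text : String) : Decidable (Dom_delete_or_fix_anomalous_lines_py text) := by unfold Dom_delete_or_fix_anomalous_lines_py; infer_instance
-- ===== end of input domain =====

-- B replaces A's single accumulator pass (running output + current line + last-char register)
-- by a tokenize-then-map decomposition: split into breaker-terminated segments, map each
-- segment to its fixed form, join, append the remainder; objective: simpler, same cost.

-- ===== PORT A =====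
-- LINE_BREAKERS (the Python set lists '\v' = '\x0b' and '\f' = '\x0c' twice)
def pvBreaker (c : Char) : Bool :=
  c == '\n' || c == '\x08' || c == '\r' || c == '\x0b' || c == '\x0c' ||
  c == '\u2028' || c == '\u2029'

-- STRONG_PUNCTUATIONS
def pvStrong (c : Char) : Bool := c == ')' || c == '.' || c == '!' || c == '?'

-- loop body of A; state = (new_text, append_line, last_char), Python's last_char '' ↦ none
def pvAStep (st : List Char × List Char × Option Char) (c : Char) :
    List Char × List Char × Option Char :=
  let al := st.2.1 ++ [c]
  if !pvBreaker c then
    (st.1, al, some c)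
  else
    if (PySem.Chars.splitOn al [' ']).length < 3 then
      (st.1, [], none)
    else
      let nt := st.1 ++ al
      let nt := if !(match st.2.2 with | some lc => pvStrong lc | none => false)
                then nt.dropLast ++ [' ']   -- new_text[:-1] + " "
                else nt
      (nt, [], none)

def delete_or_fix_anomalous_lines_py (text : String) : String :=
  let st := text.toList.foldl pvAStep ([], [], none)
  String.ofList (st.1 ++ st.2.1)   -- new_text + append_line

-- ===== PORT B =====
-- _split_keepends loop body; state = (segments, cur)
def pvBStep (st : List (List Char) × List Char) (c : Char) :
    List (List Char) × List Char :=
  let cur := st.2 ++ [c]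
  if pvBreaker c then (st.1 ++ [cur], []) else (st.1, cur)

-- _fix_segment (the 'none' branch of seg[-2] is unreachable: a segment passing the
-- word-count test contains two spaces and its terminating breaker, so has length ≥ 3)
def pvFixSegment (seg : List Char) : List Char :=
  if (PySem.Chars.splitOn seg [' ']).length < 3 then []
  else
    match PySem.List.pyGet? seg (-2) with
    | some c => if pvStrong c then seg else seg.dropLast ++ [' ']
    | none => []

def delete_or_fix_anomalous_lines_py_alt (text : String) : String :=
  let st := text.toList.foldl pvBStep ([], [])
  String.ofList ((st.1.map pvFixSegment).flatten ++ st.2)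

-- ===== PRECONDITION & SPEC =====
def Spec_delete_or_fix_anomalous_lines_py (text : String) (out : String) : Prop := out = delete_or_fix_anomalous_lines_py_alt text
instance (text : String) (out : String) : Decidable (Spec_delete_or_fix_anomalous_lines_py text out) := by unfold Spec_delete_or_fix_anomalous_lines_py; infer_instance

-- ===== CLAIM (what is proved, stated in full; the proofs are below) =====
def Claim_equal_delete_or_fix_anomalous_lines_py : Prop := ∀ (text : String), Dom_delete_or_fix_anomalous_lines_py text → Spec_delete_or_fix_anomalous_lines_py text (delete_or_fix_anomalous_lines_py text)

-- ===== LEMMAS AND PROOFS =====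

-- B's tokenizer run from (ss, cur) only ever appends to ss
theorem pvBStep_shift (l : List Char) (ss : List (List Char)) (cur : List Char) :
    l.foldl pvBStep (ss, cur)
      = (ss ++ (l.foldl pvBStep ([], cur)).1, (l.foldl pvBStep ([], cur)).2) := by
  induction l generalizing ss cur with
  | nil => simp
  | cons c rest ih =>
    simp only [List.foldl_cons, pvBStep, List.nil_append]
    by_cases hb : pvBreaker c
    · simp only [hb, if_true]
      rw [ih (ss ++ [cur ++ [c]]) [], ih [cur ++ [c]] []]
      simp
    · simp only [hb, Bool.false_eq_true, if_false]
      exact ih ss (cur ++ [c])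

-- seg[-2] of a segment al ++ [c] with al nonempty is the last char of al
theorem pvGet_neg_two (al : List Char) (c : Char) (h : al ≠ []) :
    PySem.List.pyGet? (al ++ [c]) (-2) = al.getLast? := by
  have hlen : 1 ≤ al.length := by
    cases al with | nil => simp at h | cons a as => simp
  simp only [PySem.List.pyGet?, PySem.List.pyIdx?, List.length_append,
    List.length_cons, List.length_nil]
  have h1 : ¬ ((0:Int) ≤ -2) := by decide
  rw [if_neg h1]
  have h2 : -((al.length + 1 : Nat) : Int) ≤ -2 := by
    push_cast; omega
  rw [if_pos (by push_cast at h2 ⊢; omega)]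
  have h3 : al.length + 1 - ((-(-2:Int)).toNat) = al.length - 1 := by
    simp
  rw [h3]
  have hbind : ((some (al.length - 1)).bind fun a => (al ++ [c])[a]?)
      = (al ++ [c])[al.length - 1]? := rfl
  rw [hbind, List.getElem?_append_left (by omega), List.getLast?_eq_getElem?]

-- on a breaker, A's whole end-of-line chain equals appending B's fixed segment
theorem pvAStep_breaker (nt al : List Char) (c : Char) (hb : pvBreaker c = true) :
    pvAStep (nt, al, al.getLast?) c = (nt ++ pvFixSegment (al ++ [c]), [], none) := by
  simp only [pvAStep, pvFixSegment, hb, Bool.not_true, Bool.false_eq_true, if_false]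
  by_cases hs : (PySem.Chars.splitOn (al ++ [c]) [' ']).length < 3
  · simp [hs]
  · rw [if_neg hs, if_neg hs]
    cases al with
    | nil =>
      exfalso
      simp only [pvBreaker, Bool.or_eq_true, beq_iff_eq] at hb
      obtain ((((((h|h)|h)|h)|h)|h)|h) := hb <;> subst h <;> exact hs (by decide)
    | cons a as =>
      rw [pvGet_neg_two (a :: as) c (by simp)]
      cases hx : (a :: as).getLast? with
      | none => exact absurd hx (by simp)
      | some x =>
        by_cases hp : pvStrong x
        · simp [hp]
        · simp only [hp, Bool.not_false, Bool.false_eq_true, if_false, if_true]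
          have h4 : nt ++ (a :: as ++ [c]) = (nt ++ (a :: as)) ++ [c] := by
            simp [List.append_assoc]
          rw [h4, List.dropLast_concat, List.dropLast_concat]
          simp [List.append_assoc]

-- main invariant: A's fold from (nt, al, last of al) produces nt ++ the mapped segments ++ remainder
theorem pvMain (l : List Char) : ∀ (nt al : List Char),
    (l.foldl pvAStep (nt, al, al.getLast?)).1 ++ (l.foldl pvAStep (nt, al, al.getLast?)).2.1
      = nt ++ ((l.foldl pvBStep ([], al)).1.map pvFixSegment).flatten
          ++ (l.foldl pvBStep ([], al)).2 := by
  induction l with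
  | nil => intro nt al; simp
  | cons c rest ih =>
    intro nt al
    by_cases hb : pvBreaker c
    · have hA : pvAStep (nt, al, al.getLast?) c
          = (nt ++ pvFixSegment (al ++ [c]), [], none) := pvAStep_breaker nt al c hb
      have hB : pvBStep ([], al) c = ([al ++ [c]], []) := by
        simp [pvBStep, hb]
      simp only [List.foldl_cons, hA, hB]
      have := ih (nt ++ pvFixSegment (al ++ [c])) []
      simp only [List.getLast?_nil] at this
      rw [this, pvBStep_shift rest [al ++ [c]] []]
      simp [List.append_assoc]
    · have hA : pvAStep (nt, al, al.getLast?) c = (nt, al ++ [c], some c) := by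
        simp [pvAStep, hb]
      have hB : pvBStep ([], al) c = ([], al ++ [c]) := by
        simp [pvBStep, hb]
      simp only [List.foldl_cons, hA, hB]
      have := ih nt (al ++ [c])
      rwa [List.getLast?_concat] at this

-- ===== VERDICT (by name: the statement is the Claim_ definition above) =====
theorem delete_or_fix_anomalous_lines_py_spec : Claim_equal_delete_or_fix_anomalous_lines_py := by
  intro text _
  unfold Spec_delete_or_fix_anomalous_lines_py
  unfold delete_or_fix_anomalous_lines_py delete_or_fix_anomalous_lines_py_alt
  have := pvMain text.toList [] []
  simp only [List.getLast?_nil] at this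
  simp only [this, List.nil_append]
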